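-- pv_equiv track=rewrite | github.com/need-singularity/sylvian-singularity | .shared/calc/topos_divisor_analysis.py | nerve_simplices
-- ===== SOURCE A (Python) =====
-- import itertools
-- from collections import defaultdict
--
-- def nerve_simplices(objs):
--     """Compute the nerve of the poset category.
--     A k-simplex = chain of length k+1: a_0 < a_1 < ... < a_k (strictly).
--     In divisibility poset: a_0 | a_1 | ... | a_k with all distinct.
--     """
--     simplices_by_dim = defaultdict(list)
--     for r in range(1, len(objs) + 1):
--         for subset in itertools.combinations(objs, r):
--             s = sorted(subset)
--             is_chain = True
--             for i in range(len(s) - 1):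
--                 if s[i+1] % s[i] != 0:
--                     is_chain = False
--                     break
--             if is_chain:
--                 simplices_by_dim[r - 1].append(s)
--     return simplices_by_dim
-- ===== SOURCE B (Python) =====
-- def _try_insert(x, c):
--     """Insert x into the sorted chain c if the result is still a chain
--     (checking only the two new neighbours); return the new chain or None."""
--     i = 0
--     while i < len(c) and c[i] < x:
--         i += 1
--     if i > 0 and x % c[i - 1] != 0:
--         return None
--     if i < len(c) and c[i] % x != 0:
--         return None
--     return c[:i] + [x] + c[i:]
--
--
-- def nerve_simplices(objs):
--     # One right-to-left pass: chains[d] holds the sorted divisibility chains of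
--     # size d+1 of the suffix processed so far, in the order itertools would list
--     # the underlying index sets; non-chains are pruned as soon as they appear.
--     chains = []
--     for x in reversed(objs):
--         prev = [[[]]] + chains
--         new = []
--         for d in range(len(prev)):
--             ext = []
--             for c in prev[d]:
--                 e = _try_insert(x, c)
--                 if e is not None:
--                     ext.append(e)
--             new.append(ext + (chains[d] if d < len(chains) else []))
--         chains = new
--     return {d: g for d, g in enumerate(chains) if g}
-- ===== Notes on version B (the rewrite author's own statement) =====
-- stated objective: faster
-- what changed: A enumerates all 2^n subsets for every size and sorts/tests each; B makes one right-to-left pass that extends only the chains that are still valid (inserting the new element at its sorted position and checking just its two neighbours), so non-chain subsets are pruned immediately and work is proportional to the number of chains.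
import Mathlib
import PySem

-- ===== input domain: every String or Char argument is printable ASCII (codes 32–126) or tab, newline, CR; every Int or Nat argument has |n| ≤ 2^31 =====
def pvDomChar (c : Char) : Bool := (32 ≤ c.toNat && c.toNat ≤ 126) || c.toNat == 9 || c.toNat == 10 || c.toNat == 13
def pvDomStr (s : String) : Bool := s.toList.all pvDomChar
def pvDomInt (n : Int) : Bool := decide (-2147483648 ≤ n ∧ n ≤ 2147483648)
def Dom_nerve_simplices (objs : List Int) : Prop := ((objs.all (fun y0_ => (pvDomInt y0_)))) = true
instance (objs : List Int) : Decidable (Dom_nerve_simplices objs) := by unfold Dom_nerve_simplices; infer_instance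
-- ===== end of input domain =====

-- B replaces A's per-size scan of all subsets by one right-to-left pass that only ever
-- extends chains that are still valid (pruning non-chains immediately), then keys the
-- nonempty length groups.

-- ===== PORT A =====

-- itertools.combinations(objs, r): all r-element subsequences, in itertools order
def pvCombos : Nat → List Int → List (List Int)
  | 0, _ => [[]]
  | _ + 1, [] => []
  | r + 1, x :: xs => (pvCombos r xs).map (fun t => x :: t) ++ pvCombos (r + 1) xs
  termination_by _r xs => xs.length

-- the 'for i in range(len(s)-1)' loop with its early break, as the obvious recursion on s
def pvIsChain : List Int → Bool
  | a :: b :: t => if PySem.Int.mod b a ≠ 0 then false else pvIsChain (b :: t)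
  | _ => true

def nerve_simplices (objs : List Int) : List (Int × List (List Int)) :=
  ((PySem.List.pyRange 1 (PySem.List.len objs + 1) 1).foldl (fun d r =>
    (pvCombos r.toNat objs).foldl (fun d subset =>
      let s := PySem.List.sorted subset (fun v => v) false
      if pvIsChain s then d.modify (r - 1) [] (fun l => l ++ [s]) else d) d)
    (PySem.Dict.empty : PySem.Dict Int (List (List Int)))).items

-- ===== PORT B =====

-- Source B _try_insert: scan for the insertion point (the while loop), check the two new
-- neighbours, splice x in (the slices)
def pvTryInsert (x : Int) (c : List Int) : Option (List Int) :=
  let i := (c.takeWhile (fun y => decide (y < x))).length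
  if 0 < i ∧ PySem.Int.mod x (c.getD (i - 1) 0) ≠ 0 then none
  else if i < c.length ∧ PySem.Int.mod (c.getD i 0) x ≠ 0 then none
  else some (c.take i ++ x :: c.drop i)

-- Source B inner 'for d in range(len(prev))' loop: walks prev, pairing prev[d] with chains[d]
-- (the tail of prev); ext keeps the successful insertions
def pvStep (x : Int) : List (List (List Int)) → List (List (List Int))
  | [] => []
  | g :: rest => (g.filterMap (pvTryInsert x) ++ rest.headD []) :: pvStep x rest

def nerve_simplices_alt (objs : List Int) : List (Int × List (List Int)) :=
  let chains := objs.reverse.foldl (fun acc x => pvStep x ([[]] :: acc)) []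
  (PySem.List.enumerate chains 0).filterMap (fun p =>
    if p.2.isEmpty then none else some (p.1, p.2))

-- ===== PRECONDITION & SPEC =====
-- Pre_ excludes exactly the inputs on which Python A raises ZeroDivisionError: those where
-- some sorted subset puts 0 before another element, i.e. 0 occurs together with a positive
-- element or occurs more than once (Python B raises there too).
def Pre_nerve_simplices (objs : List Int) : Prop :=
  (0 : Int) ∈ objs → (objs.count 0 = 1 ∧ ∀ x ∈ objs, x ≤ 0)
instance (objs : List Int) : Decidable (Pre_nerve_simplices objs) := by
  unfold Pre_nerve_simplices; infer_instance

def pvWitness_nerve_simplices : List Int := [1, 2, 4, 3]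

def Spec_nerve_simplices (objs : List Int) (out : List (Int × List (List Int))) : Prop :=
  out = nerve_simplices_alt objs
instance (objs : List Int) (out : List (Int × List (List Int))) : Decidable (Spec_nerve_simplices objs out) := by
  unfold Spec_nerve_simplices; infer_instance

-- ===== CLAIM (what is proved, stated in full; the proofs are below) =====
def Claim_equal_nerve_simplices : Prop := ∀ (objs : List Int), Dom_nerve_simplices objs → Pre_nerve_simplices objs → Spec_nerve_simplices objs (nerve_simplices objs)

-- ===== LEMMAS AND PROOFS =====

theorem pvIsChain_iff_chain : ∀ (s : List Int),
    pvIsChain s = true ↔ List.IsChain (fun a b => a ∣ b) s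
  | [] => by simp [pvIsChain]
  | [a] => by simp [pvIsChain]
  | a :: b :: t => by
    rw [pvIsChain]
    by_cases h : PySem.Int.mod b a = 0
    · have hd : a ∣ b := (PySem.Int.mod_eq_zero_iff_dvd b a).mp h
      simp only [h, ne_eq, not_true_eq_false, if_false]
      rw [pvIsChain_iff_chain (b :: t)]
      simp [List.isChain_cons (l := b :: t), hd]
    · simp only [h, ne_eq, not_false_eq_true, if_true]
      constructor
      · intro hh; cases hh
      · intro hh
        exfalso
        rcases (List.isChain_cons.mp hh) with ⟨h1, _⟩
        exact h ((PySem.Int.mod_eq_zero_iff_dvd b a).mpr (h1 b rfl))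

def pvIns (x : Int) (c : List Int) : List Int :=
  c.takeWhile (fun y => decide (y < x)) ++ x :: c.dropWhile (fun y => decide (y < x))

theorem pvIns_perm (x : Int) (c : List Int) : (pvIns x c).Perm (x :: c) := by
  unfold pvIns
  have h1 := List.perm_middle (a := x) (l₁ := c.takeWhile (fun y => decide (y < x)))
      (l₂ := c.dropWhile (fun y => decide (y < x)))
  rwa [List.takeWhile_append_dropWhile] at h1

theorem pvLe_of_mem_dropWhile (x b : Int) (c : List Int) (h : c.Pairwise (· ≤ ·))
    (hb : b ∈ c.dropWhile (fun y => decide (y < x))) : x ≤ b := by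
  have hdr : (c.dropWhile (fun y => decide (y < x))).Pairwise (· ≤ ·) :=
    List.Pairwise.sublist (List.dropWhile_sublist _) h
  cases hdw : c.dropWhile (fun y => decide (y < x)) with
  | nil => rw [hdw] at hb; cases hb
  | cons e t =>
    have hxe : x ≤ e := by
      have := List.head?_dropWhile_not (fun y => decide (y < x)) c
      rw [hdw] at this; simpa using this
    rw [hdw] at hb hdr
    rcases List.mem_cons.mp hb with rfl | hb'
    · exact hxe
    · exact le_trans hxe ((List.pairwise_cons.mp hdr).1 b hb')

theorem pvIns_pairwise (x : Int) (c : List Int) (h : c.Pairwise (· ≤ ·)) :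
    (pvIns x c).Pairwise (· ≤ ·) := by
  unfold pvIns
  have hsplit : c = c.takeWhile (fun y => decide (y < x)) ++ c.dropWhile (fun y => decide (y < x)) :=
    (List.takeWhile_append_dropWhile).symm
  have h' := h
  rw [hsplit, List.pairwise_append] at h'
  rcases h' with ⟨htk, hdr, _⟩
  rw [List.pairwise_append]
  refine ⟨htk, ?_, ?_⟩
  · rw [List.pairwise_cons]
    exact ⟨fun b hb => pvLe_of_mem_dropWhile x b c h hb, hdr⟩
  · intro a ha b hb
    have hax : a < x := by have := List.mem_takeWhile_imp ha; simpa using this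
    rcases List.mem_cons.mp hb with rfl | hb'
    · exact le_of_lt hax
    · exact le_of_lt (lt_of_lt_of_le hax (pvLe_of_mem_dropWhile x b c h hb'))

theorem pvSorted_cons (x : Int) (sub : List Int) :
    PySem.List.sorted (x :: sub) (fun v => v) false
      = pvIns x (PySem.List.sorted sub (fun v => v) false) := by
  have hp1 : (PySem.List.sorted (x :: sub) (fun v => v) false).Pairwise (· ≤ ·) := by
    simpa using PySem.List.sorted_pairwise (xs := x :: sub) (key := fun v => v)
  have hp2 : (pvIns x (PySem.List.sorted sub (fun v => v) false)).Pairwise (· ≤ ·) :=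
    pvIns_pairwise x _ (by simpa using PySem.List.sorted_pairwise (xs := sub) (key := fun v => v))
  have p1 : (PySem.List.sorted (x :: sub) (fun v => v) false).Perm (x :: sub) :=
    PySem.List.sorted_perm _ _ _
  have p2 : (x :: sub).Perm (x :: PySem.List.sorted sub (fun v => v) false) :=
    List.Perm.cons x (PySem.List.sorted_perm _ _ _).symm
  exact List.Perm.eq_of_pairwise (fun a b _ _ h1 h2 => le_antisymm h1 h2) hp1 hp2
    ((p1.trans p2).trans (pvIns_perm _ _).symm)

theorem pvTake_takeWhile {α : Type} (p : α → Bool) : ∀ (l : List α),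
    l.take (l.takeWhile p).length = l.takeWhile p
  | [] => rfl
  | a :: l => by
    by_cases h : p a
    · simp [h, pvTake_takeWhile p l]
    · simp [h]

theorem pvDrop_takeWhile {α : Type} (p : α → Bool) : ∀ (l : List α),
    l.drop (l.takeWhile p).length = l.dropWhile p
  | [] => rfl
  | a :: l => by
    by_cases h : p a
    · simp [h, pvDrop_takeWhile p l]
    · simp [h]

theorem pvTryInsert_eq (x : Int) (c : List Int) :
    pvTryInsert x c
      = if ((c.takeWhile (fun y => decide (y < x))).getLast?.all (fun a => decide (a ∣ x)))
          ∧ ((c.dropWhile (fun y => decide (y < x))).head?.all (fun b => decide (x ∣ b)))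
        then some (pvIns x c) else none := by
  simp only [pvTryInsert, pvIns]
  set tk := c.takeWhile (fun y => decide (y < x)) with htk
  set dr := c.dropWhile (fun y => decide (y < x)) with hdr
  have hsplit : c = tk ++ dr := (List.takeWhile_append_dropWhile).symm
  have htake : c.take tk.length = tk := pvTake_takeWhile _ c
  have hdrop : c.drop tk.length = dr := pvDrop_takeWhile _ c
  rw [htake, hdrop]
  have hlen : c.length = tk.length + dr.length := by rw [hsplit, List.length_append]
  have hGetLast : ∀ a, tk.getLast? = some a → c.getD (tk.length - 1) 0 = a := by
    intro a ha
    have hpos : 0 < tk.length := by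
      rcases List.getLast?_eq_some_iff.mp ha with ⟨u, hu⟩
      rw [hu]; simp
    rw [hsplit, List.getD_eq_getElem?_getD, List.getElem?_append_left (by omega),
      ← List.getLast?_eq_getElem?, ha]
    rfl
  have hHead : ∀ b, dr.head? = some b → c.getD tk.length 0 = b := by
    intro b hb
    rw [hsplit, List.getD_eq_getElem?_getD, List.getElem?_append_right (le_refl _), Nat.sub_self,
      ← List.head?_eq_getElem?, hb]
    rfl
  have hc1 : (0 < tk.length ∧ PySem.Int.mod x (c.getD (tk.length - 1) 0) ≠ 0)
      ↔ ¬ ((tk.getLast?.all (fun a => decide (a ∣ x))) = true) := by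
    cases htkl : tk.getLast? with
    | none =>
      have : tk = [] := List.getLast?_eq_none_iff.mp htkl
      simp [this]
    | some a =>
      have hpos : 0 < tk.length := by
        rcases List.getLast?_eq_some_iff.mp htkl with ⟨u, hu⟩
        rw [hu]; simp
      rw [hGetLast a htkl]
      constructor
      · rintro ⟨-, hm⟩
        simp only [Option.all_some, decide_eq_true_eq]
        intro hdv
        exact hm ((PySem.Int.mod_eq_zero_iff_dvd x a).mpr hdv)
      · intro hna
        refine ⟨hpos, fun hm => hna ?_⟩
        simp only [Option.all_some, decide_eq_true_eq]
        exact (PySem.Int.mod_eq_zero_iff_dvd x a).mp hm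
  have hc2 : (tk.length < c.length ∧ PySem.Int.mod (c.getD tk.length 0) x ≠ 0)
      ↔ ¬ ((dr.head?.all (fun b => decide (x ∣ b))) = true) := by
    cases hdrh : dr.head? with
    | none =>
      have : dr = [] := List.head?_eq_none_iff.mp hdrh
      simp [this, hlen]
    | some b =>
      have hpos : 0 < dr.length := by
        rcases List.head?_eq_some_iff.mp hdrh with ⟨u, hu⟩
        rw [hu]; simp
      rw [hHead b hdrh]
      constructor
      · rintro ⟨-, hm⟩
        simp only [Option.all_some, decide_eq_true_eq]
        intro hdv
        exact hm ((PySem.Int.mod_eq_zero_iff_dvd b x).mpr hdv)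
      · intro hnb
        refine ⟨by omega, fun hm => hnb ?_⟩
        simp only [Option.all_some, decide_eq_true_eq]
        exact (PySem.Int.mod_eq_zero_iff_dvd b x).mp hm
  split_ifs with h1 h2 h3 h4 h5 <;> first
    | rfl
    | (exact absurd h3 (by tauto))
    | (exact absurd h1 (by tauto))

def pvChainVal (sub : List Int) : Option (List Int) :=
  let s := PySem.List.sorted sub (fun v => v) false
  if pvIsChain s then some s else none

theorem pvIsChain_sub (x : Int) (s : List Int) (h : pvIsChain (pvIns x s) = true) :
    pvIsChain s = true := by
  rw [pvIsChain_iff_chain] at h ⊢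
  rw [List.isChain_iff_pairwise] at h ⊢
  refine List.Pairwise.sublist ?_ h
  unfold pvIns
  have : s = s.takeWhile (fun y => decide (y < x)) ++ s.dropWhile (fun y => decide (y < x)) :=
    (List.takeWhile_append_dropWhile).symm
  nth_rewrite 1 [this]
  exact List.Sublist.append (List.Sublist.refl _) (List.sublist_cons_self _ _)

theorem pvIsChain_ins (x : Int) (s : List Int) (hs : pvIsChain s = true) :
    pvIsChain (pvIns x s) = true
      ↔ (((s.takeWhile (fun y => decide (y < x))).getLast?.all (fun a => decide (a ∣ x)))
          ∧ ((s.dropWhile (fun y => decide (y < x))).head?.all (fun b => decide (x ∣ b))) : Bool)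
        = true := by
  rw [pvIsChain_iff_chain] at hs ⊢
  unfold pvIns
  rw [List.isChain_append]
  have hsplit : s = s.takeWhile (fun y => decide (y < x)) ++ s.dropWhile (fun y => decide (y < x)) :=
    (List.takeWhile_append_dropWhile).symm
  rw [hsplit, List.isChain_append] at hs
  rcases hs with ⟨htk, hdr, -⟩
  rw [List.isChain_cons]
  simp only [Option.all_eq_true, decide_eq_true_eq, Option.mem_def]
  constructor
  · rintro ⟨-, ⟨hx, -⟩, hlink⟩
    exact ⟨fun a ha => hlink a ha x rfl, fun b hb => hx b hb⟩
  · rintro ⟨hl, hr⟩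
    exact ⟨htk, ⟨fun y hy => hr y hy, hdr⟩, fun a ha y hy => by cases hy; exact hl a ha⟩

theorem pvChainVal_cons (x : Int) (sub : List Int) :
    pvChainVal (x :: sub) = (pvChainVal sub).bind (pvTryInsert x) := by
  simp only [pvChainVal, pvSorted_cons]
  set s := PySem.List.sorted sub (fun v => v) false with hsdef
  by_cases hs : pvIsChain s = true
  · rw [if_pos hs, Option.bind_some, pvTryInsert_eq]
    by_cases hcond : (((s.takeWhile (fun y => decide (y < x))).getLast?.all (fun a => decide (a ∣ x)))
          ∧ ((s.dropWhile (fun y => decide (y < x))).head?.all (fun b => decide (x ∣ b))) : Bool) = true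
    · rw [if_pos ((pvIsChain_ins x s hs).mpr hcond)]
      rw [if_pos (by simpa [Bool.and_eq_true] using hcond)]
    · rw [if_neg (fun h => hcond ((pvIsChain_ins x s hs).mp h))]
      rw [if_neg (by simpa [Bool.and_eq_true, -Bool.decide_and] using hcond)]
  · rw [if_neg hs, if_neg (fun h => hs (pvIsChain_sub x s h))]
    rfl

def pvS (xs : List Int) (r : Nat) : List (List Int) :=
  (pvCombos r xs).filterMap pvChainVal

theorem pvS_zero (xs : List Int) : pvS xs 0 = [[]] := by
  unfold pvS
  rw [pvCombos]
  rfl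

theorem pvCombos_big : ∀ (r : Nat) (xs : List Int), xs.length < r → pvCombos r xs = []
  | 0, xs, h => by omega
  | r + 1, [], _ => by rw [pvCombos]
  | r + 1, x :: xs, h => by
    rw [pvCombos, pvCombos_big r xs (by simpa using Nat.lt_of_succ_lt_succ h),
      pvCombos_big (r + 1) xs (by simp at h ⊢; omega)]
    simp
  termination_by _r xs => xs.length

theorem pvS_big (xs : List Int) (r : Nat) (h : xs.length < r) : pvS xs r = [] := by
  unfold pvS
  rw [pvCombos_big r xs h]
  rfl

theorem pvS_cons (x : Int) (xs : List Int) (r : Nat) :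
    pvS (x :: xs) (r + 1) = (pvS xs r).filterMap (pvTryInsert x) ++ pvS xs (r + 1) := by
  unfold pvS
  rw [pvCombos, List.filterMap_append, List.filterMap_filterMap]
  congr 1
  rw [List.filterMap_map]
  congr 1
  funext sub
  exact pvChainVal_cons x sub

theorem pvStep_length (x : Int) : ∀ (l : List (List (List Int))),
    (pvStep x l).length = l.length
  | [] => rfl
  | g :: rest => by rw [pvStep]; simp [pvStep_length x rest]

theorem pvStep_getElem (x : Int) : ∀ (l : List (List (List Int))) (d : Nat)
    (h : d < l.length) (h' : d < (pvStep x l).length),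
    (pvStep x l)[d] = l[d].filterMap (pvTryInsert x) ++ (l[d+1]?.getD [])
  | g :: rest, 0, h, h' => by
    simp only [pvStep]
    simp [List.headD_eq_head?_getD, List.head?_eq_getElem?]
  | g :: rest, d + 1, h, h' => by
    simp only [pvStep]
    simp only [List.getElem_cons_succ]
    rw [pvStep_getElem x rest d (by simpa using h) (by rw [pvStep_length]; simpa using h)]
    simp

def pvChainsB (xs : List Int) : List (List (List Int)) :=
  xs.reverse.foldl (fun acc x => pvStep x ([[]] :: acc)) []

theorem pvChainsB_cons (x : Int) (xs : List Int) :
    pvChainsB (x :: xs) = pvStep x ([[]] :: pvChainsB xs) := by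
  unfold pvChainsB
  rw [List.reverse_cons, List.foldl_append]
  rfl

theorem pvChainsB_spec : ∀ (xs : List Int),
    pvChainsB xs = (List.range xs.length).map (fun d => pvS xs (d + 1))
  | [] => rfl
  | x :: xs => by
    rw [pvChainsB_cons, pvChainsB_spec xs]
    set n := xs.length with hn
    apply List.ext_getElem
    · rw [pvStep_length]; simp [hn]
    · intro d hd hd'
      have hdn : d < n + 1 := by simpa using hd'
      have hdl : d < ([[]] :: (List.range n).map (fun d => pvS xs (d + 1))).length := by
        simpa using hdn
      rw [pvStep_getElem x _ d hdl hd]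
      have hprev : ([[]] :: (List.range n).map (fun d => pvS xs (d + 1)))[d]'(by simpa using hdn) = pvS xs d := by
        cases d with
        | zero => simpa using (pvS_zero xs).symm
        | succ d' => simp [List.getElem_map, List.getElem_range]
      have hprev2 : (([[]] :: (List.range n).map (fun d => pvS xs (d + 1)))[d+1]?).getD [] = pvS xs (d + 1) := by
        rcases Nat.lt_or_ge d n with h | h
        · rw [List.getElem?_cons_succ]
          simp [h]
        · have hdn' : d = n := by omega
          rw [List.getElem?_cons_succ]
          rw [hdn']
          simp [pvS_big xs (n + 1) (by omega)]
      rw [hprev, hprev2]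
      simp only [List.getElem_map, List.getElem_range]
      exact (pvS_cons x xs d).symm

def pvTarget (xs : List Int) : List (Int × List (List Int)) :=
  (List.range xs.length).filterMap (fun d =>
    if pvS xs (d + 1) = [] then none else some (((d : Nat) : Int), pvS xs (d + 1)))

theorem pvEnumerate_map_range {α : Type} (f : Nat → α) : ∀ (n : Nat),
    PySem.List.enumerate ((List.range n).map f) 0
      = (List.range n).map (fun d => (((d : Nat) : Int), f d))
  | 0 => rfl
  | n + 1 => by
    rw [List.range_succ, List.map_append, List.map_append,
      PySem.List.enumerate_append, pvEnumerate_map_range f n]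
    simp

theorem pvAlt_eq_target (objs : List Int) : nerve_simplices_alt objs = pvTarget objs := by
  show (PySem.List.enumerate (pvChainsB objs) 0).filterMap (fun p =>
      if p.2.isEmpty then none else some (p.1, p.2)) = pvTarget objs
  rw [pvChainsB_spec, pvEnumerate_map_range, List.filterMap_map]
  unfold pvTarget
  congr 1
  funext d
  by_cases h : pvS objs (d + 1) = []
  · simp [h]
  · simp [h, List.isEmpty_iff]

theorem pvInner_filterMap (k : Int) : ∀ (L : List (List Int)) (d : PySem.Dict Int (List (List Int))),
    L.foldl (fun d subset =>
      if pvIsChain (PySem.List.sorted subset (fun v => v) false) = true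
      then d.modify k [] (fun l => l ++ [PySem.List.sorted subset (fun v => v) false]) else d) d
    = (L.filterMap pvChainVal).foldl (fun d s => d.modify k [] (fun l => l ++ [s])) d
  | [], d => rfl
  | sub :: L, d => by
    rw [List.foldl_cons, List.filterMap_cons]
    by_cases h : pvIsChain (PySem.List.sorted sub (fun v => v) false) = true
    · have hv : pvChainVal sub = some (PySem.List.sorted sub (fun v => v) false) := by
        unfold pvChainVal; rw [if_pos h]
      rw [hv, if_pos h, List.foldl_cons, pvInner_filterMap k L _]
    · have hv : pvChainVal sub = none := by
        unfold pvChainVal; rw [if_neg h]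
      rw [hv, if_neg h, pvInner_filterMap k L d]

theorem pvModify_last (k : Int) (d0 : List (Int × List (List Int))) (acc : List (List Int))
    (f : List (List Int) → List (List Int)) (hf : ∀ p ∈ d0, p.1 ≠ k) :
    PySem.Dict.modify (PySem.Dict.mk (d0 ++ [(k, acc)])) k [] f
      = PySem.Dict.mk (d0 ++ [(k, f acc)]) := by
  have hfind : d0.find? (fun p => p.1 == k) = none := by
    rw [List.find?_eq_none]
    intro p hp
    simpa using hf p hp
  have hget : (PySem.Dict.mk (d0 ++ [(k, acc)])).get? k = some acc := by
    show ((d0 ++ [(k, acc)]).find? (fun p => p.1 == k)).map (fun x => x.2) = some acc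
    rw [List.find?_append, hfind]
    simp
  have hcont : (PySem.Dict.mk (d0 ++ [(k, acc)])).contains k = true := by
    show (d0 ++ [(k, acc)]).any (fun p => p.1 == k) = true
    simp
  show PySem.Dict.insert _ k (f ((PySem.Dict.mk (d0 ++ [(k, acc)])).getD k [])) = _
  rw [show (PySem.Dict.mk (d0 ++ [(k, acc)])).getD k [] = acc by
    show ((PySem.Dict.mk (d0 ++ [(k, acc)])).get? k).getD [] = acc
    rw [hget]; rfl]
  show (if (PySem.Dict.mk (d0 ++ [(k, acc)])).contains k = true then _ else _) = _
  rw [if_pos hcont]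
  congr 1
  show (d0 ++ [(k, acc)]).map (fun p => if (p.1 == k) = true then (k, f acc) else p)
      = d0 ++ [(k, f acc)]
  rw [List.map_append]
  congr 1
  · rw [List.map_congr_left (g := id) (fun p hp => by simp [hf p hp]), List.map_id]
  · simp

theorem pvPushLoop (k : Int) : ∀ (L : List (List Int)) (d0 : List (Int × List (List Int)))
    (acc : List (List Int)), (∀ p ∈ d0, p.1 ≠ k) →
    L.foldl (fun d s => PySem.Dict.modify d k [] (fun l => l ++ [s]))
      (PySem.Dict.mk (d0 ++ [(k, acc)]))
    = PySem.Dict.mk (d0 ++ [(k, acc ++ L)])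
  | [], d0, acc, hf => by simp
  | s :: L, d0, acc, hf => by
    rw [List.foldl_cons, pvModify_last k d0 acc _ hf, pvPushLoop k L d0 (acc ++ [s]) hf]
    simp

theorem pvPushStart (k : Int) (L : List (List Int)) (d0 : List (Int × List (List Int)))
    (hf : ∀ p ∈ d0, p.1 ≠ k) :
    L.foldl (fun d s => PySem.Dict.modify d k [] (fun l => l ++ [s])) (PySem.Dict.mk d0)
    = PySem.Dict.mk (d0 ++ if L = [] then [] else [(k, L)]) := by
  cases L with
  | nil => simp
  | cons s L =>
    rw [List.foldl_cons]
    have hstep : PySem.Dict.modify (PySem.Dict.mk d0) k [] (fun l => l ++ [s])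
        = PySem.Dict.mk (d0 ++ [(k, [s])]) := by
      have hfind : d0.find? (fun p => p.1 == k) = none := by
        rw [List.find?_eq_none]; intro p hp; simpa using hf p hp
      have hcont : (PySem.Dict.mk d0).contains k = false := by
        show d0.any (fun p => p.1 == k) = false
        rw [List.any_eq_false]
        intro p hp; simpa using hf p hp
      have hget : (PySem.Dict.mk d0).get? k = none := by
        show (d0.find? (fun p => p.1 == k)).map (fun x => x.2) = none
        rw [hfind]; rfl
      show PySem.Dict.insert (PySem.Dict.mk d0) k (((PySem.Dict.mk d0).get? k).getD [] ++ [s])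
          = PySem.Dict.mk (d0 ++ [(k, [s])])
      rw [hget]
      show (if (PySem.Dict.mk d0).contains k = true then _ else _) = _
      rw [hcont]
      simp
    rw [hstep, pvPushLoop k L d0 [s] hf]
    simp

def pvTargetN (xs : List Int) (m : Nat) : List (Int × List (List Int)) :=
  (List.range m).filterMap (fun d =>
    if pvS xs (d + 1) = [] then none else some (((d : Nat) : Int), pvS xs (d + 1)))

theorem pvTargetN_key (xs : List Int) (m : Nat) (p : Int × List (List Int))
    (hp : p ∈ pvTargetN xs m) : p.1 ≠ ((m : Nat) : Int) := by
  unfold pvTargetN at hp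
  rcases List.mem_filterMap.mp hp with ⟨d, hd, hval⟩
  have hdm : d < m := List.mem_range.mp hd
  by_cases h : pvS xs (d + 1) = []
  · rw [if_pos h] at hval; cases hval
  · rw [if_neg h] at hval
    cases hval
    simp only [ne_eq, Int.natCast_inj]
    omega

theorem pvAfold (objs : List Int) : ∀ (m : Nat),
    ((List.range m).map (fun j => (1 : Int) + (j : Nat))).foldl (fun d r =>
      (pvCombos r.toNat objs).foldl (fun d subset =>
        if pvIsChain (PySem.List.sorted subset (fun v => v) false) = true
        then d.modify (r - 1) [] (fun l => l ++ [PySem.List.sorted subset (fun v => v) false])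
        else d) d)
      (PySem.Dict.empty : PySem.Dict Int (List (List Int)))
    = PySem.Dict.mk (pvTargetN objs m)
  | 0 => rfl
  | m + 1 => by
    rw [List.range_succ, List.map_append, List.foldl_append, pvAfold objs m]
    rw [List.map_cons, List.map_nil, List.foldl_cons, List.foldl_nil]
    have ht : ((1 : Int) + (m : Nat)).toNat = m + 1 := by omega
    have hm : ((1 : Int) + (m : Nat)) - 1 = ((m : Nat) : Int) := by omega
    rw [ht, hm, pvInner_filterMap]
    show (pvS objs (m + 1)).foldl _ _ = _
    rw [pvPushStart ((m : Nat) : Int) (pvS objs (m + 1)) (pvTargetN objs m)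
      (fun p hp => pvTargetN_key objs m p hp)]
    congr 1
    unfold pvTargetN
    rw [List.range_succ, List.filterMap_append, List.filterMap_cons, List.filterMap_nil]
    by_cases h : pvS objs (m + 1) = []
    · rw [if_pos h, if_pos h]
    · rw [if_neg h, if_neg h]

theorem pvA_eq_target (objs : List Int) : nerve_simplices objs = pvTarget objs := by
  unfold nerve_simplices
  have hr : PySem.List.pyRange 1 (PySem.List.len objs + 1) 1
      = (List.range objs.length).map (fun j => (1 : Int) + (j : Nat)) := by
    rw [PySem.List.pyRange_one]
    congr 1
    simp
  rw [hr]
  rw [show ∀ (l : List Int) (d₀ : PySem.Dict Int (List (List Int))),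
      l.foldl (fun d r =>
        (pvCombos r.toNat objs).foldl (fun d subset =>
          let s := PySem.List.sorted subset (fun v => v) false
          if pvIsChain s then d.modify (r - 1) [] (fun l => l ++ [s]) else d) d) d₀
      = l.foldl (fun d r =>
        (pvCombos r.toNat objs).foldl (fun d subset =>
          if pvIsChain (PySem.List.sorted subset (fun v => v) false) = true
          then d.modify (r - 1) [] (fun l => l ++ [PySem.List.sorted subset (fun v => v) false])
          else d) d) d₀ from fun l d₀ => rfl]
  rw [pvAfold objs objs.length]
  rfl

-- ===== VERDICT (by name: the statement is the Claim_ definition above) =====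
theorem nerve_simplices_spec : Claim_equal_nerve_simplices := by
  intro objs _ _
  unfold Spec_nerve_simplices
  rw [pvA_eq_target, pvAlt_eq_target]
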